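-- pv_equiv track=rewrite | github.com/ialsina/DocToMood | questiondb/process.py | find_blocks
-- ===== SOURCE A (Python) =====
-- def find_blocks(paragraphs):
--     """
--     Find blocks separated by double (or more) newlines.
--     This function ONLY detects where blocks are - it does NOT analyze content.
--
--     Returns:
--         blocks: list[list[str]]  # Each block is a list of paragraph text lines
--     """
--     blocks = []
--     i = 0
--     n = len(paragraphs)
--
--     while i < n:
--         # Count empty lines before potential block
--         empty_before = 0
--         while i < n and not paragraphs[i].strip():
--             empty_before += 1
--             i += 1
--
--         # If we've reached the end, break
--         if i >= n:
--             break
--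
--         # Start of a potential block
--         block_start = i
--         block_lines = []
--
--         # Collect consecutive non-empty lines (the block)
--         while i < n and paragraphs[i].strip():
--             block_lines.append(paragraphs[i])
--             i += 1
--
--         # Count empty lines after the block
--         empty_after = 0
--         j = i
--         while j < n and not paragraphs[j].strip():
--             empty_after += 1
--             j += 1
--
--         # Block is valid if separated by 2+ newlines (double newline)
--         # Blocks at start/end are also valid
--         is_at_start = block_start == 0
--         is_at_end = i >= n
--         has_double_newline_before = empty_before >= 1
--         has_double_newline_after = empty_after >= 1
--
--         if has_double_newline_before or has_double_newline_after or is_at_start or is_at_end: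
--             if block_lines:  # Only add non-empty blocks
--                 blocks.append(block_lines)
--
--     return blocks
-- ===== SOURCE B (Python) =====
-- def find_blocks(paragraphs):
--     """Build the full run-length grouping (blank/non-blank keyed runs) in one pass,
--     then keep only the non-blank runs."""
--     groups = []
--     prev = None
--     for p in paragraphs:
--         k = bool(p.strip())
--         if k == prev:
--             groups[-1][1].append(p)
--         else:
--             groups.append((k, [p]))
--             prev = k
--     return [lines for k, lines in groups if k]
-- ===== Notes on version B (the rewrite author's own statement) =====
-- stated objective: simpler
-- what changed: A's nested while-loops that skip blank runs, collect a block, look ahead for blanks and test a validity condition are replaced by a single uniform pass that builds the complete keyed run table (blank/non-blank runs) and then filters out the blank runs.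
import Mathlib
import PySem

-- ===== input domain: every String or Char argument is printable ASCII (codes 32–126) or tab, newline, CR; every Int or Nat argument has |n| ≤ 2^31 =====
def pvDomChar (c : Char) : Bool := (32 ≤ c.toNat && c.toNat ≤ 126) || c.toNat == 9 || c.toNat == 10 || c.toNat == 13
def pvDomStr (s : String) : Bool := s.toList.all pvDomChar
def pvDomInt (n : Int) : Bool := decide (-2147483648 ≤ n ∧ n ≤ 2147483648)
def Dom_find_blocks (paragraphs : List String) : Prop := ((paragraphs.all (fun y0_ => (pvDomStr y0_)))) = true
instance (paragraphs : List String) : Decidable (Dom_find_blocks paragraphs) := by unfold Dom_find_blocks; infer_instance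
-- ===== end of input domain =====

-- B replaces A's nested skip/collect while-loops by one pass that builds the full
-- blank/non-blank keyed run table and then filters it (objective: simpler; not faster).

-- `not p.strip()` — whether a line is blank (empty after stripping whitespace)
def isBlankLine (s : String) : Bool := PySem.Str.strip s == ""

-- ===== PORT A =====
-- one iteration of A's outer while-loop, acting on the remaining suffix of `paragraphs`;
-- `first` records whether the global index i is still at the start (block_start == 0 is
-- only possible in the first outer iteration, with no blanks skipped)
def find_blocks_go (ps : List String) (first : Bool) : List (List String) :=
  let pre := ps.takeWhile isBlankLine          -- inner loop counting empty_before
  match _hrest : ps.dropWhile isBlankLine with  -- skip the empty lines; "if i >= n: break"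
  | [] => []
  | q :: qs =>
    let blk := (q :: qs).takeWhile (fun s => !isBlankLine s)   -- collect block_lines
    let rest2 := (q :: qs).dropWhile (fun s => !isBlankLine s)
    let post := rest2.takeWhile isBlankLine    -- inner loop counting empty_after
    let is_at_start := first && (pre.length == 0)
    let is_at_end := rest2.isEmpty
    let cond := (1 ≤ pre.length) || (1 ≤ post.length) || is_at_start || is_at_end
    (if cond && !blk.isEmpty then [blk] else []) ++ find_blocks_go rest2 false
termination_by ps.length
decreasing_by
  have hq : isBlankLine q = false := by
    have h0 := List.head_dropWhile_not isBlankLine (l := ps) (by rw [_hrest]; simp)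
    simpa [_hrest] using h0
  have h1 : (q :: qs).length ≤ ps.length := by
    rw [← _hrest]; exact List.length_dropWhile_le _ _
  simp only [List.dropWhile_cons, hq, Bool.not_false, if_true]
  have h2 := List.length_dropWhile_le (fun s => !isBlankLine s) qs
  simp at h1 ⊢
  omega

def find_blocks (paragraphs : List String) : List (List String) :=
  find_blocks_go paragraphs true

-- ===== PORT B =====
-- groups[-1][1].append(p)
def modifyLast : List (Bool × List String) → String → List (Bool × List String)
  | [], _ => []
  | g :: gs, p => if gs.isEmpty then [(g.1, g.2 ++ [p])] else g :: modifyLast gs p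

-- one step of B's for-loop over (groups, prev)
def stepB (st : List (Bool × List String) × Option Bool) (p : String) :
    List (Bool × List String) × Option Bool :=
  let k := !isBlankLine p
  if st.2 = some k then (modifyLast st.1 p, st.2)
  else (st.1 ++ [(k, [p])], some k)

def find_blocks_alt (paragraphs : List String) : List (List String) :=
  ((paragraphs.foldl stepB ([], none)).1.filter (·.1)).map (·.2)

-- ===== PRECONDITION & SPEC =====
def Spec_find_blocks (paragraphs : List String) (out : List (List String)) : Prop := out = find_blocks_alt paragraphs
instance (paragraphs : List String) (out : List (List String)) : Decidable (Spec_find_blocks paragraphs out) := by unfold Spec_find_blocks; infer_instance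

-- ===== CLAIM (what is proved, stated in full; the proofs are below) =====
def Claim_equal_find_blocks : Prop := ∀ (paragraphs : List String), Dom_find_blocks paragraphs → Spec_find_blocks paragraphs (find_blocks paragraphs)

-- ===== LEMMAS AND PROOFS =====

-- canonical form: the maximal runs of non-blank lines
def runs : List String → List (List String)
  | [] => []
  | p :: ps =>
    if isBlankLine p then runs ps
    else (p :: ps.takeWhile (fun s => !isBlankLine s)) :: runs (ps.dropWhile (fun s => !isBlankLine s))
termination_by ps => ps.length
decreasing_by
  · simp
  · exact Nat.lt_succ_of_le (List.length_dropWhile_le _ ps)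

theorem runs_dropWhile (ps : List String) :
    runs (ps.dropWhile isBlankLine) = runs ps := by
  induction ps with
  | nil => rfl
  | cons p ps ih =>
    by_cases hp : isBlankLine p
    · rw [List.dropWhile_cons_of_pos hp, ih, runs, if_pos hp]
    · rw [List.dropWhile_cons_of_neg hp]

theorem find_blocks_go_eq_runs_aux (n : Nat) :
    ∀ ps : List String, ps.length ≤ n → ∀ first, find_blocks_go ps first = runs ps := by
  induction n with
  | zero =>
    intro ps hl first
    have : ps = [] := List.eq_nil_of_length_eq_zero (Nat.le_zero.mp hl)
    subst this; simp [find_blocks_go, runs]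
  | succ n ih =>
    intro ps hl first
    rw [find_blocks_go]
    split
    · rename_i heq
      rw [← runs_dropWhile ps, heq]; simp [runs]
    · rename_i q qs heq
      have hq : isBlankLine q = false := by
        have h0 := List.head_dropWhile_not isBlankLine (l := ps) (by rw [heq]; simp)
        simpa [heq] using h0
      have h1 : (q :: qs).length ≤ ps.length := by
        rw [← heq]; exact List.length_dropWhile_le _ _
      have hrest2 : (q :: qs).dropWhile (fun s => !isBlankLine s)
          = qs.dropWhile (fun s => !isBlankLine s) := by
        simp [hq]
      have hblk : (q :: qs).takeWhile (fun s => !isBlankLine s)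
          = q :: qs.takeWhile (fun s => !isBlankLine s) := by
        simp [hq]
      have hlen2 : (qs.dropWhile (fun s => !isBlankLine s)).length ≤ n := by
        have := List.length_dropWhile_le (fun s => !isBlankLine s) qs
        simp at h1; omega
      -- the validity condition is always true: blank after the block, or at the end
      have hcond : (decide (1 ≤ (ps.takeWhile isBlankLine).length)
          || decide (1 ≤ ((qs.dropWhile (fun s => !isBlankLine s)).takeWhile isBlankLine).length)
          || (first && ((ps.takeWhile isBlankLine).length == 0))
          || (qs.dropWhile (fun s => !isBlankLine s)).isEmpty) = true := by
        rcases h2 : qs.dropWhile (fun s => !isBlankLine s) with _ | ⟨r, rs⟩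
        · simp
        · have hr : isBlankLine r = true := by
            have h0 := List.head_dropWhile_not (fun s => !isBlankLine s) (l := qs)
              (by rw [h2]; simp)
            simpa [h2] using h0
          simp [hr]
      simp only [hblk, hrest2, List.isEmpty_cons, Bool.not_false, Bool.and_true, hcond]
      rw [if_pos trivial, ih _ hlen2 false, ← runs_dropWhile ps, heq, runs]
      simp [hq]

theorem find_blocks_go_eq_runs (ps : List String) (first : Bool) :
    find_blocks_go ps first = runs ps :=
  find_blocks_go_eq_runs_aux ps.length ps le_rfl first

-- the non-blank groups of the keyed run table
def extractB (gs : List (Bool × List String)) : List (List String) :=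
  (gs.filter (·.1)).map (·.2)

theorem extractB_append (xs ys : List (Bool × List String)) :
    extractB (xs ++ ys) = extractB xs ++ extractB ys := by
  simp [extractB]

theorem modifyLast_append (gs : List (Bool × List String)) (k : Bool) (ls : List String)
    (p : String) : modifyLast (gs ++ [(k, ls)]) p = gs ++ [(k, ls ++ [p])] := by
  induction gs with
  | nil => simp [modifyLast]
  | cons g gs ih => simp [modifyLast, ih]

theorem foldB_aux (n : Nat) :
    ∀ ps : List String, ps.length ≤ n →
      (∀ gs acc, extractB (ps.foldl stepB (gs ++ [(true, acc)], some true)).1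
        = extractB gs ++ [acc ++ ps.takeWhile (fun s => !isBlankLine s)]
            ++ runs (ps.dropWhile (fun s => !isBlankLine s)))
      ∧ (∀ gs acc, extractB (ps.foldl stepB (gs ++ [(false, acc)], some false)).1
        = extractB gs ++ runs ps) := by
  induction n with
  | zero =>
    intro ps hl
    have : ps = [] := List.eq_nil_of_length_eq_zero (Nat.le_zero.mp hl)
    subst this
    constructor <;> intro gs acc <;> simp [extractB, runs]
  | succ n ih =>
    intro ps hl
    rcases ps with _ | ⟨p, ps'⟩
    · constructor <;> intro gs acc <;> simp [extractB, runs]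
    · have hl' : ps'.length ≤ n := by simp at hl; omega
      constructor <;> intro gs acc
      · by_cases hp : isBlankLine p
        · -- blank line ends the non-blank run: a new (false, [p]) group is opened
          have hstep : stepB (gs ++ [(true, acc)], some true) p
              = ((gs ++ [(true, acc)]) ++ [(false, [p])], some false) := by
            simp [stepB, hp]
          rw [List.foldl_cons, hstep, (ih ps' hl').2]
          rw [extractB_append]
          simp [extractB, hp, runs]
        · have hstep : stepB (gs ++ [(true, acc)], some true) p
              = (gs ++ [(true, acc ++ [p])], some true) := by
            simp [stepB, hp, modifyLast_append]
          rw [List.foldl_cons, hstep, (ih ps' hl').1]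
          simp [hp]
      · by_cases hp : isBlankLine p
        · have hstep : stepB (gs ++ [(false, acc)], some false) p
              = (gs ++ [(false, acc ++ [p])], some false) := by
            simp [stepB, hp, modifyLast_append]
          rw [List.foldl_cons, hstep, (ih ps' hl').2, runs, if_pos hp]
        · -- non-blank line opens a new (true, [p]) group
          have hstep : stepB (gs ++ [(false, acc)], some false) p
              = ((gs ++ [(false, acc)]) ++ [(true, [p])], some true) := by
            simp [stepB, hp]
          rw [List.foldl_cons, hstep, (ih ps' hl').1]
          rw [extractB_append, runs, if_neg hp]
          simp [extractB]

theorem alt_eq_runs (ps : List String) :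
    find_blocks_alt ps = runs ps := by
  have halt : find_blocks_alt ps = extractB (ps.foldl stepB ([], none)).1 := rfl
  rcases ps with _ | ⟨p, ps'⟩
  · simp [halt, extractB, runs]
  · have hl' : ps'.length ≤ ps'.length := le_rfl
    by_cases hp : isBlankLine p
    · have hstep : stepB (([] : List (Bool × List String)), (none : Option Bool)) p
          = ([] ++ [(false, [p])], some false) := by simp [stepB, hp]
      rw [halt, List.foldl_cons, hstep, (foldB_aux ps'.length ps' hl').2, runs, if_pos hp]
      simp [extractB]
    · have hstep : stepB (([] : List (Bool × List String)), (none : Option Bool)) p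
          = ([] ++ [(true, [p])], some true) := by simp [stepB, hp]
      rw [halt, List.foldl_cons, hstep, (foldB_aux ps'.length ps' hl').1, runs, if_neg hp]
      simp [extractB]

-- ===== VERDICT (by name: the statement is the Claim_ definition above) =====
theorem find_blocks_spec : Claim_equal_find_blocks := by
  intro ps _
  unfold Spec_find_blocks
  rw [alt_eq_runs, find_blocks, find_blocks_go_eq_runs]
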